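-- pv_equiv track=rewrite | github.com/Ali1858/crs-rlhf | evaluations/rl_eval_rewarding.py | get_ordered_path
-- ===== SOURCE A (Python) =====
-- def get_ordered_path(paths):
--     sorted_path = []
--     if 'crs' in paths[0] or 'abs' in paths[0]:
--         checkpoint_numbers =  ['80','160','240','320','400','480','560','checkpoint']
--     else:
--         checkpoint_numbers = ['100','200','300','400','500','checkpoint']
--     for num in checkpoint_numbers:
--         for p in paths:
--             if num in p:
--                 sorted_path.append(p)
--                 break
--     return sorted_path
-- ===== SOURCE B (Python) =====
-- def get_ordered_path(paths):
--     if 'crs' in paths[0] or 'abs' in paths[0]: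
--         markers = ['80', '160', '240', '320', '400', '480', '560', 'checkpoint']
--     else:
--         markers = ['100', '200', '300', '400', '500', 'checkpoint']
--     found = {}
--     pending = markers
--     for p in paths:
--         still = []
--         for m in pending:
--             if m in p:
--                 found[m] = p
--             else:
--                 still.append(m)
--         pending = still
--         if not pending:
--             break
--     return [found[m] for m in markers if m in found]
-- ===== Notes on version B (the rewrite author's own statement) =====
-- stated objective: alternative
-- what changed: Replaces A's marker-outer rescans of paths with a single path-outer pass that keeps a shrinking worklist of unmatched markers (early exit when empty) and a dict of first matches, then emits in marker order.
import Mathlib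
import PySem

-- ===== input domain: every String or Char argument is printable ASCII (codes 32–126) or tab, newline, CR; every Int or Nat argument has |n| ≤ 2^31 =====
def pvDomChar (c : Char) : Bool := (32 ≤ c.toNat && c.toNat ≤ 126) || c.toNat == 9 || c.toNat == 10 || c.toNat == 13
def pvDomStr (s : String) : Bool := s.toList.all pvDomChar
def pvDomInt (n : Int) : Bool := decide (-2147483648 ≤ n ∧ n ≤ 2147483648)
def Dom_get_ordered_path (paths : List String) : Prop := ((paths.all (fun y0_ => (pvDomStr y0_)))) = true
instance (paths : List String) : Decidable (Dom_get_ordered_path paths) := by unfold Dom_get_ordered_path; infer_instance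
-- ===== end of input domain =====

-- B replaces A's marker-outer rescans of `paths` with a single path-outer pass
-- keeping a SHRINKING worklist of still-unmatched markers (with early exit when
-- it empties) plus a dict of first matches, then emits in marker order
-- (alternative decomposition, same asymptotic cost). Pre_ excludes the empty
-- list, on which both Pythons raise IndexError at paths[0].

-- ===== PORT A =====
-- 'for p in paths: if num in p: append; break' = first path containing num
def get_ordered_path (paths : List String) : List String :=
  match paths with
  | [] => []  -- unreachable under Pre_ (Python raises IndexError on paths[0])
  | p0 :: _ =>
    let checkpoint_numbers :=
      if PySem.Str.isIn "crs" p0 || PySem.Str.isIn "abs" p0 then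
        ["80", "160", "240", "320", "400", "480", "560", "checkpoint"]
      else
        ["100", "200", "300", "400", "500", "checkpoint"]
    checkpoint_numbers.foldl (fun sorted_path num =>
      match paths.find? (fun p => PySem.Str.isIn num p) with
      | some p => sorted_path ++ [p]
      | none => sorted_path) []

-- ===== PORT B =====
-- inner 'for m in pending' loop of one path p: partitions pending into matched
-- (recorded in found) and still-unmatched markers
def pvScan (p : String) (pending : List String)
    (st : List String × PySem.Dict String String) :
    List String × PySem.Dict String String :=
  pending.foldl (fun st m =>
    if PySem.Str.isIn m p then (st.1, st.2.insert m p) else (st.1 ++ [m], st.2)) st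

-- outer 'for p in paths' loop with the 'if not pending: break' early exit
def pvLoop (paths pending : List String) (found : PySem.Dict String String) :
    PySem.Dict String String :=
  match paths with
  | [] => found
  | p :: ps =>
    let s := pvScan p pending ([], found)
    if s.1.isEmpty then s.2 else pvLoop ps s.1 s.2

def get_ordered_path_alt (paths : List String) : List String :=
  match paths with
  | [] => []  -- unreachable under Pre_ (Python raises IndexError on paths[0])
  | p0 :: _ =>
    let markers :=
      if PySem.Str.isIn "crs" p0 || PySem.Str.isIn "abs" p0 then
        ["80", "160", "240", "320", "400", "480", "560", "checkpoint"]
      else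
        ["100", "200", "300", "400", "500", "checkpoint"]
    let found := pvLoop paths markers PySem.Dict.empty
    markers.filterMap (fun m => found.get? m)

-- ===== PRECONDITION & SPEC =====
-- Pre_ excludes only the empty list: there A raises IndexError (paths[0]).
def Pre_get_ordered_path (paths : List String) : Prop := paths ≠ []
instance (paths : List String) : Decidable (Pre_get_ordered_path paths) := by
  unfold Pre_get_ordered_path; infer_instance
def pvWitness_get_ordered_path : List String := ["model-crs/checkpoint-80"]

def Spec_get_ordered_path (paths : List String) (out : List String) : Prop := out = get_ordered_path_alt paths
instance (paths : List String) (out : List String) : Decidable (Spec_get_ordered_path paths out) := by unfold Spec_get_ordered_path; infer_instance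

-- ===== CLAIM (what is proved, stated in full; the proofs are below) =====
def Claim_equal_get_ordered_path : Prop := ∀ (paths : List String), Dom_get_ordered_path paths → Pre_get_ordered_path paths → Spec_get_ordered_path paths (get_ordered_path paths)

-- ===== LEMMAS AND PROOFS =====

theorem pvScan_fst (p : String) (pending : List String)
    (st : List String × PySem.Dict String String) :
    (pvScan p pending st).1 =
      st.1 ++ pending.filter (fun m => !PySem.Str.isIn m p) := by
  induction pending generalizing st with
  | nil => simp [pvScan]
  | cons m rest ih =>
    simp only [pvScan, List.foldl_cons] at ih ⊢
    rw [ih, List.filter_cons]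
    cases hb : PySem.Str.isIn m p <;> simp

theorem pvScan_get? (p : String) (pending : List String)
    (st : List String × PySem.Dict String String) (m : String) :
    (pvScan p pending st).2.get? m =
      if m ∈ pending ∧ PySem.Str.isIn m p = true then some p else st.2.get? m := by
  induction pending generalizing st with
  | nil => simp [pvScan]
  | cons m' rest ih =>
    simp only [pvScan, List.foldl_cons] at ih ⊢
    rw [ih]
    by_cases hm : m ∈ rest ∧ PySem.Str.isIn m p = true
    · rw [if_pos hm, if_pos ⟨List.mem_cons_of_mem _ hm.1, hm.2⟩]
    · rw [if_neg hm]
      by_cases hc : PySem.Str.isIn m' p = true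
      · rw [if_pos hc]
        show (st.2.insert m' p).get? m = _
        by_cases he : m = m'
        · subst he
          rw [PySem.Dict.get?_insert_self, if_pos ⟨by simp, hc⟩]
        · rw [PySem.Dict.get?_insert_of_ne st.2 p he,
            if_neg (fun h => (List.mem_cons.mp h.1).elim he (fun h1 => hm ⟨h1, h.2⟩))]
      · rw [if_neg hc]
        show st.2.get? m = _
        rw [if_neg (fun h => (List.mem_cons.mp h.1).elim
          (fun heq => hc (by rw [← heq]; exact h.2)) (fun h1 => hm ⟨h1, h.2⟩))]

-- keys never on the worklist are untouched by the loop
theorem pvLoop_get?_not_mem (paths : List String) :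
    ∀ (pending : List String) (found : PySem.Dict String String) (m : String),
    m ∉ pending → (pvLoop paths pending found).get? m = found.get? m := by
  induction paths with
  | nil => intro pending found m _; rfl
  | cons p ps ih =>
    intro pending found m hm
    simp only [pvLoop]
    have hget := pvScan_get? p pending ([], found) m
    rw [if_neg (fun h => hm h.1)] at hget
    have hmem : m ∉ (pvScan p pending ([], found)).1 := by
      rw [pvScan_fst]
      simp only [List.nil_append, List.mem_filter]
      exact fun h => hm h.1
    split
    · exact hget
    · rw [ih _ _ _ hmem]; exact hget

-- a marker still on the worklist with no recorded value gets the first match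
theorem pvLoop_get?_mem (paths : List String) :
    ∀ (pending : List String) (found : PySem.Dict String String) (m : String),
    m ∈ pending → found.get? m = none →
    (pvLoop paths pending found).get? m =
      paths.find? (fun p => PySem.Str.isIn m p) := by
  induction paths with
  | nil => intro pending found m _ hnone; simpa [pvLoop] using hnone
  | cons p ps ih =>
    intro pending found m hm hnone
    simp only [pvLoop, List.find?_cons]
    have hget := pvScan_get? p pending ([], found) m
    by_cases hp : PySem.Str.isIn m p = true
    · rw [if_pos ⟨hm, hp⟩] at hget
      have hmem : m ∉ (pvScan p pending ([], found)).1 := by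
        rw [pvScan_fst]
        simp only [List.nil_append, List.mem_filter]
        intro h
        rw [hp] at h
        exact absurd h.2 (by simp)
      rw [hp]
      split
      · exact hget
      · rw [pvLoop_get?_not_mem ps _ _ _ hmem]; exact hget
    · have hp' : PySem.Str.isIn m p = false := by
        cases h : PySem.Str.isIn m p
        · rfl
        · exact absurd h hp
      rw [if_neg (fun h => hp h.2)] at hget
      have hmem : m ∈ (pvScan p pending ([], found)).1 := by
        rw [pvScan_fst]
        simp only [List.nil_append, List.mem_filter]
        exact ⟨hm, by rw [hp']; rfl⟩
      have hne : ¬ (pvScan p pending ([], found)).1.isEmpty = true := by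
        rw [List.isEmpty_iff]
        exact fun h => by rw [h] at hmem; cases hmem
      rw [if_neg hne, hp']
      exact ih _ _ _ hmem (by rw [hget]; exact hnone)

-- A's append-or-skip foldl is filterMap of the finder
theorem pvFoldl_find (paths l acc : List String) :
    l.foldl (fun sorted_path num =>
      match paths.find? (fun p => PySem.Str.isIn num p) with
      | some p => sorted_path ++ [p]
      | none => sorted_path) acc =
    acc ++ l.filterMap (fun num => paths.find? (fun p => PySem.Str.isIn num p)) := by
  induction l generalizing acc with
  | nil => simp
  | cons x rest ih =>
    simp only [List.foldl_cons, List.filterMap_cons]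
    cases paths.find? (fun p => PySem.Str.isIn x p) with
    | none => exact ih acc
    | some v => rw [ih]; simp

theorem pv_main (paths : List String) (h : paths ≠ []) :
    get_ordered_path paths = get_ordered_path_alt paths := by
  match paths, h with
  | p0 :: ps, _ =>
    simp only [get_ordered_path, get_ordered_path_alt]
    split <;>
    · rw [pvFoldl_find, List.nil_append]
      refine List.filterMap_congr ?_
      intro m hm
      rw [pvLoop_get?_mem (p0 :: ps) _ PySem.Dict.empty m hm rfl]

-- ===== VERDICT (by name: the statement is the Claim_ definition above) =====
theorem get_ordered_path_spec : Claim_equal_get_ordered_path := by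
  intro paths _ hpre
  exact pv_main paths hpre
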